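-- pv_equiv track=rewrite | github.com/adityajadhav-quant/codebase | find_largest_x_appearing_x_times.py | find_largest_x_appearing_x_times
-- ===== SOURCE A (Python) =====
-- from collections import Counter
--
-- def find_largest_x_appearing_x_times(A):
--     """
--     Finds the largest integer X that appears exactly X times in the list A.
--
--     Args:
--         A (list of int): The input list of integers.
--
--     Returns:
--         int: The largest X where frequency of X equals X, or 0 if none exists.
--     """
--     if not A:
--         return 0
--
--     frequency_map = Counter(A)
--     valid_numbers = [number for number, freq in frequency_map.items() if number == freq]
--
--     if not valid_numbers:
--         return 0
--
--     return max(valid_numbers)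
-- ===== SOURCE B (Python) =====
-- def find_largest_x_appearing_x_times(A):
--     S = sorted(A)
--     best = 0
--     i = 0
--     n = len(S)
--     while i < n:
--         # find the end of the run of S[i]
--         j = i + 1
--         while j < n and S[j] == S[i]:
--             j += 1
--         run = j - i
--         if S[i] == run and S[i] > best:
--             best = S[i]
--         i = j
--     return best
-- ===== Notes on version B (the rewrite author's own statement) =====
-- stated objective: alternative
-- what changed: Replaces Counter's hash-table tally plus candidate-list plus max() with sorting a copy and one linear scan over maximal runs of equal values, keeping a running maximum of values equal to their run length.
import Mathlib
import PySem

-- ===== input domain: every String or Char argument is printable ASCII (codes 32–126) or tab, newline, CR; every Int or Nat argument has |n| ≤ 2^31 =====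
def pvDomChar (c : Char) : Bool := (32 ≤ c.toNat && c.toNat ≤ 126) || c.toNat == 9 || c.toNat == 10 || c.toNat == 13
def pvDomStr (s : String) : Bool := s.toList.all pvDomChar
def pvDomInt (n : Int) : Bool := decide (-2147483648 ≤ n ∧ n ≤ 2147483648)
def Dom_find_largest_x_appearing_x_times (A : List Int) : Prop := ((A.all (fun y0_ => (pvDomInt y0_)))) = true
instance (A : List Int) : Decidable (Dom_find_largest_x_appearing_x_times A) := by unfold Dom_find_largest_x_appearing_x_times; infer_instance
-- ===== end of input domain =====

-- B replaces Counter's tally + candidate list + max() with sort-then-run-scan: one pass over the sorted copy,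
-- keeping a running maximum of values equal to their run length; equal return value proved below.

-- ===== PORT A =====
def find_largest_x_appearing_x_times (A : List Int) : Int :=
  if A = [] then 0
  else
    let frequency_map := PySem.Dict.counter A
    let valid_numbers := (frequency_map.items.filter (fun p => p.1 == p.2)).map (·.1)
    if valid_numbers = [] then 0
    else match PySem.List.max? valid_numbers (fun x => x) with
         | some m => m
         | none => 0  -- unreachable: guarded by the emptiness check, as in the Python

-- ===== PORT B =====
-- the outer while loop of Source B: at each head x, the inner while scan is the takeWhile prefix of
-- equal elements (run = 1 + its length), then the loop resumes at the rest (dropWhile)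
def pvRunScan (best : Int) (S : List Int) : Int :=
  match S with
  | [] => best
  | x :: t =>
      let run : Int := 1 + (t.takeWhile (fun y => y == x)).length
      pvRunScan (if x == run && best < x then x else best) (t.dropWhile (fun y => y == x))
termination_by S.length
decreasing_by simp; exact List.length_dropWhile_le _ t

def find_largest_x_appearing_x_times_alt (A : List Int) : Int :=
  pvRunScan 0 (PySem.List.sorted A (fun x => x) false)

-- ===== PRECONDITION & SPEC =====
def Spec_find_largest_x_appearing_x_times (A : List Int) (out : Int) : Prop := out = find_largest_x_appearing_x_times_alt A
instance (A : List Int) (out : Int) : Decidable (Spec_find_largest_x_appearing_x_times A out) := by unfold Spec_find_largest_x_appearing_x_times; infer_instance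

-- ===== CLAIM (what is proved, stated in full; the proofs are below) =====
def Claim_equal_find_largest_x_appearing_x_times : Prop := ∀ (A : List Int), Dom_find_largest_x_appearing_x_times A → Spec_find_largest_x_appearing_x_times A (find_largest_x_appearing_x_times A)

-- ===== LEMMAS AND PROOFS =====

theorem pvRunScan_nil (best : Int) : pvRunScan best [] = best := by
  rw [pvRunScan.eq_def]

theorem pvRunScan_cons (best x : Int) (t : List Int) :
    pvRunScan best (x :: t) =
      pvRunScan (if x == 1 + ((t.takeWhile (fun y => y == x)).length : Int) && best < x then x else best)
        (t.dropWhile (fun y => y == x)) := by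
  rw [pvRunScan.eq_def]

-- Characterisation of the run scan on a sorted list S whose element counts agree with A's:
-- the result extends best, is best or a valid element, and dominates every valid element of S.
theorem pv_scan_props (A : List Int) (n : Nat) : ∀ (S : List Int) (best : Int), S.length ≤ n →
    S.Pairwise (· ≤ ·) → (∀ y ∈ S, S.count y = A.count y) →
    (best ≤ pvRunScan best S) ∧
    (pvRunScan best S = best ∨ (pvRunScan best S ∈ S ∧ pvRunScan best S = (A.count (pvRunScan best S) : Int))) ∧
    (∀ y ∈ S, y = (A.count y : Int) → y ≤ pvRunScan best S) := by
  induction n with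
  | zero =>
      intro S best hlen _ _
      have : S = [] := List.length_eq_zero_iff.mp (Nat.le_zero.mp hlen)
      subst this
      refine ⟨le_of_eq (pvRunScan_nil best).symm, Or.inl (pvRunScan_nil best), by intro y hy; exact absurd hy List.not_mem_nil⟩
  | succ k ih =>
      intro S best hlen hpair hcnt
      cases S with
      | nil =>
          refine ⟨le_of_eq (pvRunScan_nil best).symm, Or.inl (pvRunScan_nil best), by intro y hy; exact absurd hy List.not_mem_nil⟩
      | cons x t =>
          have hx_le : ∀ y ∈ t, x ≤ y := (List.pairwise_cons.mp hpair).1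
          have hpt : t.Pairwise (· ≤ ·) := (List.pairwise_cons.mp hpair).2
          set T := t.takeWhile (fun y => y == x) with hTdef
          set R := t.dropWhile (fun y => y == x) with hRdef
          have hTR : T ++ R = t := List.takeWhile_append_dropWhile
          have hTmem : ∀ y ∈ T, y = x := by
            intro y hy
            rw [hTdef] at hy
            have hpy := List.mem_takeWhile_imp hy
            exact eq_of_beq hpy
          have hRsub : List.Sublist R t := List.dropWhile_sublist _
          have hxR : x ∉ R := by
            intro hxin
            cases hR : R with
            | nil => rw [hR] at hxin; exact absurd hxin List.not_mem_nil
            | cons y0 R' =>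
                have hRne : t.dropWhile (fun y => y == x) ≠ [] := by rw [← hRdef, hR]; simp
                have hhead := List.head_dropWhile_not (fun y => y == x) hRne
                have hy0 : y0 ≠ x := by
                  have heq : ((t.dropWhile (fun y => y == x)).head hRne) = y0 := by
                    simp [← hRdef, hR]
                  rw [heq] at hhead
                  simpa using hhead
                have hy0t : y0 ∈ t := hRsub.mem (hR ▸ List.mem_cons_self)
                have hxy0 : x < y0 := lt_of_le_of_ne (hx_le y0 hy0t) (Ne.symm hy0)
                have hpR : R.Pairwise (· ≤ ·) := hpt.sublist hRsub
                rw [hR] at hxin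
                rcases List.mem_cons.mp hxin with h | h
                · exact absurd h.symm (ne_of_gt hxy0)
                · have : y0 ≤ x := ((List.pairwise_cons.mp (hR ▸ hpR)).1) x h
                  omega
          have hcx : (x :: t).count x = 1 + T.length := by
            rw [List.count_cons_self, ← hTR, List.count_append]
            have h1 : T.count x = T.length := List.count_eq_length.mpr (fun b hb => (hTmem b hb).symm)
            have h2 : R.count x = 0 := List.count_eq_zero.mpr hxR
            omega
          have hrun : (1 + (T.length : Int)) = (A.count x : Int) := by
            have := hcnt x List.mem_cons_self
            rw [hcx] at this
            omega
          have hcR : ∀ y ∈ R, R.count y = A.count y := by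
            intro y hy
            have hyx : y ≠ x := fun h => hxR (h ▸ hy)
            have h0 : T.count y = 0 := List.count_eq_zero.mpr (fun hyT => hyx (hTmem y hyT))
            have h1 : (x :: t).count y = R.count y := by
              rw [List.count_cons_of_ne (Ne.symm hyx), ← hTR, List.count_append]
              omega
            have := hcnt y (List.mem_cons_of_mem x (hRsub.mem hy))
            omega
          have hpR : R.Pairwise (· ≤ ·) := hpt.sublist hRsub
          have hlenR : R.length ≤ k := by
            have h1 := List.length_dropWhile_le (fun y => y == x) t
            simp only [List.length_cons] at hlen
            rw [hRdef]
            omega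
          -- unfold one step of the scan
          set run : Int := 1 + (T.length : Int) with hrundef
          set best' : Int := if x == run && best < x then x else best with hbest'
          have hstep : pvRunScan best (x :: t) = pvRunScan best' R := by
            rw [pvRunScan_cons]
          obtain ⟨ihle, ihor, ihmax⟩ := ih R best' hlenR hpR hcR
          have hbb' : best ≤ best' := by
            rw [hbest']
            by_cases hc : (x == run && best < x) = true
            · rw [if_pos hc]
              have := (by simpa using hc : x = run ∧ best < x)
              omega
            · rw [if_neg hc]
          refine ⟨?_, ?_, ?_⟩
          · rw [hstep]; omega
          · rw [hstep]
            rcases ihor with h | ⟨hmem, hval⟩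
            · rw [h, hbest']
              by_cases hc : (x == run && best < x) = true
              · rw [if_pos hc]
                obtain ⟨hxr, _⟩ := (by simpa using hc : x = run ∧ best < x)
                exact Or.inr ⟨List.mem_cons_self, by rw [← hrun, ← hxr]⟩
              · rw [if_neg hc]; exact Or.inl rfl
            · exact Or.inr ⟨List.mem_cons_of_mem x (hRsub.mem hmem), hval⟩
          · intro y hy hyv
            rw [hstep]
            have hcase : y = x ∨ y ∈ R → y ≤ pvRunScan best' R := by
              intro hc
              rcases hc with heq | hyR
              · -- y = x: the head run is tested exactly against A.count x
                subst heq
                have hxr : y = run := by rw [hrun]; exact hyv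
                by_cases hlt : best < y
                · have hbeq : (y == run) = true := by simp [hxr]
                  have hdec : decide (best < y) = true := by simp [hlt]
                  have hcnd : (y == run && best < y) = true := by rw [hbeq, hdec]; rfl
                  have hbx : best' = y := by rw [hbest', if_pos hcnd]
                  rw [← hbx]; exact ihle
                · omega
              · exact ihmax y hyR hyv
            rcases List.mem_cons.mp hy with heq | hyt
            · exact hcase (Or.inl heq)
            · rcases List.mem_append.mp (hTR ▸ hyt) with hyT | hyR
              · exact hcase (Or.inl (hTmem y hyT))
              · exact hcase (Or.inr hyR)

-- ===== VERDICT (by name: the statement is the Claim_ definition above) =====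
theorem find_largest_x_appearing_x_times_spec : Claim_equal_find_largest_x_appearing_x_times := by
  intro A _
  unfold Spec_find_largest_x_appearing_x_times
  unfold find_largest_x_appearing_x_times find_largest_x_appearing_x_times_alt
  dsimp only
  set SA : List Int := PySem.List.sorted A (fun x => x) false with hSA
  have hperm : SA.Perm A := PySem.List.sorted_perm A (fun x => x) false
  have hpair : SA.Pairwise (· ≤ ·) := PySem.List.sorted_pairwise A (fun x => x)
  have hcnt : ∀ y ∈ SA, SA.count y = A.count y := fun y _ => hperm.count y
  obtain ⟨hge, hor, hmax⟩ := pv_scan_props A SA.length SA 0 (le_refl _) hpair hcnt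
  set r : Int := pvRunScan 0 SA with hr
  -- A's candidate list is the filter of the ordered dedup of A under the validity predicate
  have hvalid : ((PySem.Dict.counter A).items.filter (fun p => p.1 == p.2)).map (·.1)
      = (PySem.Set.ofList A).filter (fun x => x == (A.count x : Int)) := by
    rw [PySem.Dict.items_counter, List.filter_map, List.map_map]
    simp only [Function.comp_def, List.map_id']
  set l1 : List Int := (PySem.Set.ofList A).filter (fun x => x == (A.count x : Int)) with hl1
  have hmem1 : ∀ x : Int, x ∈ l1 ↔ (x ∈ A ∧ x = (A.count x : Int)) := by
    intro x
    simp [hl1, List.mem_filter, PySem.Set.mem_ofList]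
  by_cases hA : A = []
  · subst hA
    rw [if_pos rfl]
    have hSAnil : SA = [] := by rw [hSA]; rfl
    rw [hr, hSAnil, pvRunScan_nil]
  · rw [if_neg hA, hvalid]
    by_cases h1 : l1 = []
    · -- no valid number: A returns 0, and the scan never updates best
      rw [if_pos h1]
      rcases hor with h | ⟨hmem, hval⟩
      · exact h.symm
      · exfalso
        have : r ∈ l1 := (hmem1 r).mpr ⟨hperm.mem_iff.mp hmem, hval⟩
        rw [h1] at this; exact absurd this List.not_mem_nil
    · rw [if_neg h1]
      obtain ⟨m, hm⟩ : ∃ m, PySem.List.max? l1 (fun x => x) = some m := by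
        cases hmx : PySem.List.max? l1 (fun x => x) with
        | none => exact absurd ((PySem.List.max?_eq_none_iff l1 (fun x => x)).mp hmx) h1
        | some m => exact ⟨m, rfl⟩
      rw [hm]
      have hmval := (hmem1 m).mp (PySem.List.max?_mem hm)
      -- m is valid, hence positive, and the scan result r equals it
      have hmpos : 1 ≤ m := by
        have : 1 ≤ A.count m := List.count_pos_iff.mpr hmval.1
        omega
      have hmler : m ≤ r := hmax m (hperm.mem_iff.mpr hmval.1) hmval.2
      have hrval : r ∈ A ∧ r = (A.count r : Int) := by
        rcases hor with h | ⟨hmem, hval⟩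
        · omega
        · exact ⟨hperm.mem_iff.mp hmem, hval⟩
      have hrlem : r ≤ m := PySem.List.max?_isMax hm r ((hmem1 r).mpr hrval)
      show m = r
      omega
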